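-- pv_equiv track=rewrite | github.com/enferas/qtimigration | tags/pyslet-0.2.20110608/pyslet/rfc2396.py | ParseURIC
-- ===== SOURCE A (Python) =====
-- def IsUpAlpha(c):
-- 	return c and (ord(c)>=0x41 and ord(c)<=0x5A)
--
-- def IsLowAlpha(c):
-- 	return c and (ord(c)>=0x61 and ord(c)<=0x7A)
--
-- def IsDigit(c):
-- 	return c and (ord(c)>=0x30 and ord(c)<=0x39)
--
-- def IsAlphaNum(c):
-- 	return IsUpAlpha(c) or IsLowAlpha(c) or IsDigit(c)
--
-- def IsReserved(c):
-- 	return c and ord(c) in (0x3B,0x2F,0x3F,0x3A,0x40,0x26,0x3D,0x2B,0x24,0x2C) # ;/?:@&=+$,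
--
-- def IsUnreserved(c):
-- 	return IsAlphaNum(c) or IsMark(c)
--
-- def IsMark(c):
-- 	return c and ord(c) in (0x2D,0x5F,0x2E,0x21,0x7E,0x2A,0x27,0x28,0x29)  # -_.!~*'()
--
-- def IsHex(c):
-- 	return c and (IsDigit(c) or (ord(c)>=0x41 and ord(c)<=0x46) or (ord(c)>=0x61 and ord(c)<=0x66))
--
-- def ParseURIC(source,pos=0):
-- 	"""Parse the source string (starting from pos) and return the number
-- 	of URI characters (uric) parsed"""
-- 	uric=0
-- 	mode=None
-- 	while pos<len(source):
-- 		c=source[pos]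
-- 		pos+=1
-- 		if mode is None:
-- 			if IsReserved(c) or IsUnreserved(c):
-- 				uric+=1
-- 			elif ord(c)==0x25: # % escape
-- 				mode='%'
-- 			else:
-- 				break
-- 		elif mode=='%':
-- 			if IsHex(c):
-- 				mode=c
-- 			else:
-- 				break
-- 		else:
-- 			if IsHex(c):
-- 				mode=None
-- 				uric+=3
-- 			else:
-- 				break
-- 	return uric
-- ===== SOURCE B (Python) =====
-- # Stateless token scanner: two position-indexed predicates (uric char at i /
-- # whole %XX escape at i) replace A's three-state mode machine; one token
-- # consumed per iteration.
--
-- def IsUpAlpha(c):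
-- 	return c and (ord(c)>=0x41 and ord(c)<=0x5A)
--
-- def IsLowAlpha(c):
-- 	return c and (ord(c)>=0x61 and ord(c)<=0x7A)
--
-- def IsDigit(c):
-- 	return c and (ord(c)>=0x30 and ord(c)<=0x39)
--
-- def IsAlphaNum(c):
-- 	return IsUpAlpha(c) or IsLowAlpha(c) or IsDigit(c)
--
-- def IsReserved(c):
-- 	return c and ord(c) in (0x3B,0x2F,0x3F,0x3A,0x40,0x26,0x3D,0x2B,0x24,0x2C)
--
-- def IsUnreserved(c):
-- 	return IsAlphaNum(c) or IsMark(c)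
--
-- def IsMark(c):
-- 	return c and ord(c) in (0x2D,0x5F,0x2E,0x21,0x7E,0x2A,0x27,0x28,0x29)
--
-- def IsHex(c):
-- 	return c and (IsDigit(c) or (ord(c)>=0x41 and ord(c)<=0x46) or (ord(c)>=0x61 and ord(c)<=0x66))
--
-- def ParseURIC(source,pos=0):
-- 	n=len(source)
-- 	def uricAt(i):
-- 		return i<n and (IsReserved(source[i]) or IsUnreserved(source[i]))
-- 	def escAt(i):
-- 		return i+2<n and source[i]=='%' and IsHex(source[i+1]) and IsHex(source[i+2])
-- 	uric=0
-- 	while True: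
-- 		if uricAt(pos):
-- 			uric+=1
-- 			pos+=1
-- 		elif escAt(pos):
-- 			uric+=3
-- 			pos+=3
-- 		else:
-- 			return uric
-- ===== Notes on version B (the rewrite author's own statement) =====
-- stated objective: simpler
-- what changed: Replaces A's three-state mode machine (None/'%'/hex) with a stateless scan built from two position-indexed predicates, uricAt(i) and escAt(i), that consume one whole token (plain uric char or %XX escape) per iteration.
import Mathlib
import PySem

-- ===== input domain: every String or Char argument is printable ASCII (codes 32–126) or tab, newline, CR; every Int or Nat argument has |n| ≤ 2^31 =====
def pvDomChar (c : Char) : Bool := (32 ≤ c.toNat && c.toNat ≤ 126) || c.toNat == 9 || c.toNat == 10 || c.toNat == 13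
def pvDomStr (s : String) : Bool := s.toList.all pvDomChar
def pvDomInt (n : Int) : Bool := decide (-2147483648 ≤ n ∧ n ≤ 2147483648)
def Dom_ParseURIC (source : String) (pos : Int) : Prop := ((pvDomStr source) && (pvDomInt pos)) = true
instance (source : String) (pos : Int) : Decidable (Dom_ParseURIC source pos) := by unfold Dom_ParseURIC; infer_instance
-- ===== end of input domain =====

-- B replaces A's three-state mode machine with a stateless one-token-per-iteration
-- scan built from two position-indexed predicates (uric char / whole %XX escape).


-- ===== PORT A =====
def pvIsUpAlpha (c : Char) : Bool := 0x41 ≤ c.toNat && c.toNat ≤ 0x5A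
def pvIsLowAlpha (c : Char) : Bool := 0x61 ≤ c.toNat && c.toNat ≤ 0x7A
def pvIsDigit (c : Char) : Bool := 0x30 ≤ c.toNat && c.toNat ≤ 0x39
def pvIsAlphaNum (c : Char) : Bool := pvIsUpAlpha c || pvIsLowAlpha c || pvIsDigit c
def pvIsReserved (c : Char) : Bool :=
  [0x3B,0x2F,0x3F,0x3A,0x40,0x26,0x3D,0x2B,0x24,0x2C].contains c.toNat
def pvIsMark (c : Char) : Bool :=
  [0x2D,0x5F,0x2E,0x21,0x7E,0x2A,0x27,0x28,0x29].contains c.toNat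
def pvIsUnreserved (c : Char) : Bool := pvIsAlphaNum c || pvIsMark c
def pvIsHex (c : Char) : Bool :=
  pvIsDigit c || (0x41 ≤ c.toNat && c.toNat ≤ 0x46) || (0x61 ≤ c.toNat && c.toNat ≤ 0x66)

/-- A's while loop; `mode` is Python's `mode` (None / '%' / last hex char).
`fuel` only makes the recursion structural: the wrapper passes `len(source) - pos`,
which bounds the number of iterations (each consumes one character). On an index
A would raise IndexError on (excluded by `Pre_ParseURIC`) we return the
accumulator, arbitrarily. -/
def pvLoopA (s : List Char) (uric : Int) (mode : Option Char) (pos : Int) : Nat → Int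
  | 0 => uric
  | fuel + 1 =>
    if pos < (s.length : Int) then
      match PySem.List.pyGet? s pos with
      | none => uric  -- Python raises IndexError here; outside Pre_ParseURIC
      | some c =>
        match mode with
        | none =>
          if pvIsReserved c || pvIsUnreserved c then pvLoopA s (uric + 1) none (pos + 1) fuel
          else if c.toNat == 0x25 then pvLoopA s uric (some '%') (pos + 1) fuel
          else uric
        | some m =>
          if m == '%' then
            if pvIsHex c then pvLoopA s uric (some c) (pos + 1) fuel else uric
          else
            if pvIsHex c then pvLoopA s (uric + 3) none (pos + 1) fuel else uric
    else uric

def ParseURIC (source : String) (pos : Int) : Int :=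
  pvLoopA source.toList 0 none pos (((source.toList.length : Int) - pos).toNat)

-- ===== PORT B =====
/-- B's `uricAt(i)`: `i<n and (IsReserved(source[i]) or IsUnreserved(source[i]))`. -/
def pvUricAt (s : List Char) (i : Int) : Bool :=
  decide (i < (s.length : Int)) &&
    (PySem.List.pyGet? s i).any (fun c => pvIsReserved c || pvIsUnreserved c)

/-- B's `escAt(i)`: `i+2<n and source[i]=='%' and IsHex(source[i+1]) and IsHex(source[i+2])`. -/
def pvEscAt (s : List Char) (i : Int) : Bool :=
  decide (i + 2 < (s.length : Int)) &&
    (PySem.List.pyGet? s i).any (fun c => c == '%') &&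
    (PySem.List.pyGet? s (i + 1)).any pvIsHex &&
    (PySem.List.pyGet? s (i + 2)).any pvIsHex

/-- B's `while True` loop: consume one token (plain uric char or a whole %XX escape)
per iteration, otherwise return. `fuel` as in `pvLoopA`. -/
def pvLoopB (s : List Char) (uric : Int) (pos : Int) : Nat → Int
  | 0 => uric
  | fuel + 1 =>
    if pvUricAt s pos then pvLoopB s (uric + 1) (pos + 1) fuel
    else if pvEscAt s pos then pvLoopB s (uric + 3) (pos + 3) fuel
    else uric

def ParseURIC_alt (source : String) (pos : Int) : Int :=
  pvLoopB source.toList 0 pos (((source.toList.length : Int) - pos).toNat)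

-- ===== PRECONDITION & SPEC =====
-- Pre_ excludes exactly the inputs where A raises IndexError: pos below -len(source).
def Pre_ParseURIC (source : String) (pos : Int) : Prop :=
  -(source.toList.length : Int) ≤ pos
instance (source : String) (pos : Int) : Decidable (Pre_ParseURIC source pos) := by
  unfold Pre_ParseURIC; infer_instance
def pvWitness_ParseURIC : String × Int := ("a%2F:b", 0)

def Spec_ParseURIC (source : String) (pos : Int) (out : Int) : Prop := out = ParseURIC_alt source pos
instance (source : String) (pos : Int) (out : Int) : Decidable (Spec_ParseURIC source pos out) := by unfold Spec_ParseURIC; infer_instance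

-- ===== CLAIM (what is proved, stated in full; the proofs are below) =====
def Claim_equal_ParseURIC : Prop := ∀ (source : String) (pos : Int), Dom_ParseURIC source pos → Pre_ParseURIC source pos → Spec_ParseURIC source pos (ParseURIC source pos)

-- ===== LEMMAS AND PROOFS =====

theorem pvGet_some (s : List Char) (pos : Int) (h1 : -(s.length : Int) ≤ pos)
    (h2 : pos < (s.length : Int)) : ∃ c, PySem.List.pyGet? s pos = some c := by
  cases hg : PySem.List.pyGet? s pos with
  | none =>
    rw [PySem.List.pyGet?_eq_none_iff] at hg
    exact absurd ⟨h1, h2⟩ hg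
  | some c => exact ⟨c, rfl⟩

theorem pvHex_ne_percent (c : Char) (h : pvIsHex c = true) : (c == '%') = false := by
  simp only [pvIsHex, pvIsDigit, Bool.or_eq_true, Bool.and_eq_true, decide_eq_true_eq] at h
  by_contra hne
  simp only [Bool.not_eq_false, beq_iff_eq] at hne
  subst hne
  simp [Char.toNat] at h

theorem pvPercent_char (c : Char) (h : (c.toNat == 0x25) = true) : c = '%' := by
  simp only [beq_iff_eq] at h
  apply Char.ext
  apply UInt32.toNat_inj.mp
  exact h

theorem pvLoop_eq (s : List Char) :
    ∀ (k fa fb : Nat) (uric pos : Int), fa ≤ k →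
      ((s.length : Int) - pos).toNat ≤ fa → ((s.length : Int) - pos).toNat ≤ fb →
      -(s.length : Int) ≤ pos → pvLoopA s uric none pos fa = pvLoopB s uric pos fb := by
  intro k
  induction k with
  | zero =>
    intro fa fb uric pos hk ha hb hge
    have hfa : fa = 0 := by omega
    subst hfa
    have h1 : ¬ pos < (s.length : Int) := by omega
    have h2 : ¬ pos + 2 < (s.length : Int) := by omega
    cases fb <;> simp [pvLoopA, pvLoopB, pvUricAt, pvEscAt, h1, h2]
  | succ k ih =>
    intro fa fb uric pos hk ha hb hge
    by_cases hlt : pos < (s.length : Int)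
    · obtain ⟨ma, rfl⟩ : ∃ m, fa = m + 1 := ⟨fa - 1, by omega⟩
      obtain ⟨mb, rfl⟩ : ∃ m, fb = m + 1 := ⟨fb - 1, by omega⟩
      obtain ⟨c, hc⟩ := pvGet_some s pos hge hlt
      simp only [pvLoopA, pvLoopB, hlt, if_true]
      rw [hc]
      by_cases hu : (pvIsReserved c || pvIsUnreserved c) = true
      · have hB : pvUricAt s pos = true := by
          simp [pvUricAt, hc, hlt, hu]
        simp only [hu, if_true, hB]
        exact ih ma mb (uric + 1) (pos + 1) (by omega) (by omega) (by omega) (by omega)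
      · have hB : pvUricAt s pos = false := by
          simp only [pvUricAt, hc, Option.any_some]
          simp [hu]
        simp only [hu, if_false, Bool.false_eq_true, hB]
        by_cases hp : (c.toNat == 0x25) = true
        · -- '%' escape: unfold A's next two steps and compare with B's escAt lookahead
          have hc' : c = '%' := pvPercent_char c hp
          subst hc'
          simp only [hp, if_true]
          by_cases h1 : pos + 1 < (s.length : Int)
          · obtain ⟨ma1, rfl⟩ : ∃ m, ma = m + 1 := ⟨ma - 1, by omega⟩
            simp only [pvLoopA, h1, if_true]
            obtain ⟨c1, hc1⟩ := pvGet_some s (pos + 1) (by omega) h1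
            rw [hc1]
            simp only [show (('%' : Char) == '%') = true from rfl, if_true]
            by_cases hx1 : pvIsHex c1 = true
            · simp only [hx1, if_true]
              by_cases h2 : pos + 2 < (s.length : Int)
              · obtain ⟨ma2, rfl⟩ : ∃ m, ma1 = m + 1 := ⟨ma1 - 1, by omega⟩
                simp only [pvLoopA, h2, if_true,
                  show pos + 1 + 1 = pos + 2 from by ring]
                obtain ⟨c2, hc2⟩ := pvGet_some s (pos + 2) (by omega) h2
                rw [hc2, pvHex_ne_percent c1 hx1]
                simp only [Bool.false_eq_true, if_false]
                by_cases hx2 : pvIsHex c2 = true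
                · have hB2 : pvEscAt s pos = true := by
                    simp [pvEscAt, hc, hc1, hc2, h2, hx1, hx2]
                  simp only [hx2, if_true, hB2,
                    show pos + 2 + 1 = pos + 3 from by ring]
                  exact ih ma2 mb (uric + 3) (pos + 3) (by omega) (by omega) (by omega) (by omega)
                · have hB2 : pvEscAt s pos = false := by
                    simp [pvEscAt, hc2, hx2]
                  simp [hx2, hB2]
              · -- fewer than 3 chars reachable: A's third iteration does not run; B's guard fails
                have h2' : ¬ pos + 1 + 1 < (s.length : Int) := by omega
                have hB2 : pvEscAt s pos = false := by
                  simp [pvEscAt, h2]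
                cases ma1 <;> simp [pvLoopA, h2', hB2]
            · -- c1 not hex: both return uric
              have hB2 : pvEscAt s pos = false := by
                simp [pvEscAt, hc1, hx1]
              simp [hx1, hB2]
          · -- fewer than 2 chars left: A's loop ends with uric; B's guard fails
            have hB2 : pvEscAt s pos = false := by
              simp [pvEscAt, show ¬ pos + 2 < (s.length : Int) from by omega]
            cases ma <;> simp [pvLoopA, h1, hB2]
        · -- not a uric char, not '%': both break
          have hB2 : pvEscAt s pos = false := by
            simp only [pvEscAt, hc, Option.any_some]
            have : (c == '%') = false := by
              by_contra hne
              simp only [Bool.not_eq_false, beq_iff_eq] at hne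
              subst hne
              simp at hp
            simp [this]
          simp [hp, hB2]
    · have h2 : ¬ pos + 2 < (s.length : Int) := by omega
      have hB : pvUricAt s pos = false := by simp [pvUricAt, hlt]
      have hB2 : pvEscAt s pos = false := by simp [pvEscAt, h2]
      cases fa <;> cases fb <;> simp [pvLoopA, pvLoopB, hlt, hB, hB2]

-- ===== VERDICT (by name: the statement is the Claim_ definition above) =====
theorem ParseURIC_spec : Claim_equal_ParseURIC := by
  intro source pos _hdom hpre
  unfold Spec_ParseURIC ParseURIC ParseURIC_alt
  exact pvLoop_eq source.toList (((source.toList.length : Int) - pos).toNat)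
    (((source.toList.length : Int) - pos).toNat) (((source.toList.length : Int) - pos).toNat)
    0 pos le_rfl le_rfl le_rfl hpre
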